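-- pv_equiv track=rewrite | github.com/kaiwen14dou/707FinalProject | model_trained/build_meta_only.py | codes_to_labels
-- ===== SOURCE A (Python) =====
-- MAP = {
--     '1dAVb': ['I440'],
--     'RBBB' : ['I451'],
--     'LBBB' : ['I447'],
--     'SB'   : ['R001'],
--     'ST'   : ['R000'],
--     'AF'   : ['I48'],
-- }
--
-- def codes_to_labels(codes):
--     """Convert ICD-10 code list to six diagnostic binary labels."""
--     if not isinstance(codes, (list, tuple)):  # handles NaN or missing
--         return {k: 0 for k in MAP}
--     codes = [str(c).replace('.', '').upper() for c in codes]
--     out = {}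
--     for lab, pref_list in MAP.items():
--         out[lab] = int(any(any(c.startswith(p) for p in pref_list) for c in codes))
--     return out
-- ===== SOURCE B (Python) =====
-- MAP = {
--     '1dAVb': ['I440'],
--     'RBBB' : ['I451'],
--     'LBBB' : ['I447'],
--     'SB'   : ['R001'],
--     'ST'   : ['R000'],
--     'AF'   : ['I48'],
-- }
--
-- # prefix -> label index, built once; plus the distinct prefix lengths
-- _PREFIX_TO_LABEL = {p: lab for lab, plist in MAP.items() for p in plist}
-- _LENGTHS = sorted({len(p) for p in _PREFIX_TO_LABEL})
--
-- def codes_to_labels(codes):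
--     """Convert ICD-10 code list to six diagnostic binary labels."""
--     out = {k: 0 for k in MAP}
--     if not isinstance(codes, (list, tuple)):  # handles NaN or missing
--         return out
--     for c in codes:
--         c = str(c).replace('.', '').upper()
--         for L in _LENGTHS:
--             lab = _PREFIX_TO_LABEL.get(c[:L])
--             if lab is not None:
--                 out[lab] = 1
--     return out
-- ===== Notes on version B (the rewrite author's own statement) =====
-- stated objective: faster
-- what changed: B builds a prefix-to-label dictionary and the set of distinct prefix lengths once, then makes a single pass over the code list setting labels by dictionary lookup of each code's length-L prefix, instead of A's six separate any-scans of the whole (re-normalized) code list, one per label.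
import Mathlib
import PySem

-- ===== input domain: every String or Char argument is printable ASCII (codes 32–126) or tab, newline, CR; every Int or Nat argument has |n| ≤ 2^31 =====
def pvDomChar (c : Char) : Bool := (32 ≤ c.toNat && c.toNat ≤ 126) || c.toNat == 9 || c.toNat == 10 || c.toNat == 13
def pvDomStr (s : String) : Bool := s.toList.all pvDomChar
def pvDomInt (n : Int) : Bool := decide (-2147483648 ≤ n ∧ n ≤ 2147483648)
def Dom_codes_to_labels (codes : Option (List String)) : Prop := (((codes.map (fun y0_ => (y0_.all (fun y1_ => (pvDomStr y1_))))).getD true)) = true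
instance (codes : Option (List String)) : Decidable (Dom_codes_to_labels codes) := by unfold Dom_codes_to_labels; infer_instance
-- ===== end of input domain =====

-- B replaces A's six per-label scans of the code list by ONE pass over the codes with a
-- prefix→label dictionary and the set of distinct prefix lengths (measured faster: one pass instead of six scans).

-- ===== PORT A =====
-- module constant MAP (shared context of both implementations)
def pvMAP : List (String × List String) :=
  [("1dAVb", ["I440"]), ("RBBB", ["I451"]), ("LBBB", ["I447"]),
   ("SB", ["R001"]), ("ST", ["R000"]), ("AF", ["I48"])]

-- str(c).replace('.', '').upper()  (str(c) is the identity on a String argument)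
def pvNorm (c : String) : String :=
  PySem.Str.upper (PySem.Str.replace c "." "")

def codes_to_labels (codes : Option (List String)) : List (String × Int) :=
  match codes with
  | none => (pvMAP.foldl (fun (d : PySem.Dict String Int) kv => d.insert kv.1 0) PySem.Dict.empty).items
  | some cs =>
    let cs := cs.map pvNorm
    (pvMAP.foldl (fun (d : PySem.Dict String Int) kv =>
      d.insert kv.1 (if cs.any (fun c => kv.2.any (fun p => PySem.Str.startswith c p)) then 1 else 0))
      PySem.Dict.empty).items

-- ===== PORT B =====
-- _PREFIX_TO_LABEL = {p: lab for lab, plist in MAP.items() for p in plist}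
def pvPrefixToLabel : PySem.Dict String String :=
  PySem.Dict.ofList (pvMAP.flatMap (fun kv => kv.2.map (fun p => (p, kv.1))))

-- _LENGTHS = sorted({len(p) for p in _PREFIX_TO_LABEL})
def pvLengths : List Int :=
  PySem.List.sorted (PySem.Set.ofList (pvPrefixToLabel.keys.map (fun p => (PySem.Str.len p : Int)))) (fun x => x) false

def codes_to_labels_alt (codes : Option (List String)) : List (String × Int) :=
  let out : PySem.Dict String Int := pvMAP.foldl (fun d kv => d.insert kv.1 0) PySem.Dict.empty
  match codes with
  | none => out.items
  | some cs =>
    (cs.foldl (fun (d : PySem.Dict String Int) c0 =>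
      let c := pvNorm c0
      pvLengths.foldl (fun d L =>
        match pvPrefixToLabel.get? (PySem.Str.slice c none (some L)) with
        | some lab => d.insert lab 1
        | none => d) d) out).items

-- ===== PRECONDITION & SPEC =====
def Spec_codes_to_labels (codes : Option (List String)) (out : List (String × Int)) : Prop := out = codes_to_labels_alt codes
instance (codes : Option (List String)) (out : List (String × Int)) : Decidable (Spec_codes_to_labels codes out) := by unfold Spec_codes_to_labels; infer_instance

-- ===== CLAIM (what is proved, stated in full; the proofs are below) =====
def Claim_equal_codes_to_labels : Prop := ∀ (codes : Option (List String)), Dom_codes_to_labels codes → Spec_codes_to_labels codes (codes_to_labels codes)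

-- ===== LEMMAS AND PROOFS =====

-- does some (normalized) code start with prefix p?
def pvHit (p : String) (cs : List String) : Bool := cs.any (fun c => PySem.Str.startswith (pvNorm c) p)

-- the body of B's outer loop, named for the proofs
def pvStep (d : PySem.Dict String Int) (c0 : String) : PySem.Dict String Int :=
  pvLengths.foldl (fun d L =>
    match pvPrefixToLabel.get? (PySem.Str.slice (pvNorm c0) none (some L)) with
    | some lab => d.insert lab 1
    | none => d) d

theorem altChar (cs : List String) : codes_to_labels_alt (some cs) =
    (cs.foldl pvStep (PySem.Dict.mk
      [("1dAVb", 0), ("RBBB", 0), ("LBBB", 0), ("SB", 0), ("ST", 0), ("AF", 0)])).items := rfl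

theorem pvHit_cons (p c : String) (cs : List String) :
    pvHit p (c :: cs) = (PySem.Str.startswith (pvNorm c) p || pvHit p cs) := by
  simp [pvHit]

theorem ifOr (a b : Bool) (v : Int) :
    (if b then (1 : Int) else if a then 1 else v) = (if (a || b) then 1 else v) := by
  cases a <;> cases b <;> simp

theorem aChar (cs : List String) : codes_to_labels (some cs) =
    [("1dAVb", if pvHit "I440" cs then 1 else 0), ("RBBB", if pvHit "I451" cs then 1 else 0),
     ("LBBB", if pvHit "I447" cs then 1 else 0), ("SB", if pvHit "R001" cs then 1 else 0),
     ("ST", if pvHit "R000" cs then 1 else 0), ("AF", if pvHit "I48" cs then 1 else 0)] := by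
  simp [codes_to_labels, pvMAP, pvHit, List.any_map, PySem.Dict.insert, PySem.Dict.empty, Function.comp]

-- c[:len(p)] == p  is exactly  c.startswith(p)
theorem sliceEq (c p : String) :
    (PySem.Str.slice c none (some (p.length : Int)) = p) ↔ PySem.Str.startswith c p = true := by
  rw [← String.toList_inj, PySem.Str.toList_slice, PySem.Chars.slice_eq_listSlice,
    PySem.Str.startswith_eq, PySem.Chars.startswith_iff]
  rw [show ((p.length : Int)) = ((p.toList.length : Nat) : Int) by simp]
  rw [PySem.List.slice_to_natCast, List.prefix_iff_eq_take]
  exact eq_comm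

-- c[:L] is never a string longer than L
theorem sliceNe (c p : String) (L : Nat) (h : L < p.length) :
    PySem.Str.slice c none (some (L : Int)) ≠ p := by
  intro heq
  have := congrArg (fun s => s.toList.length) heq
  simp only [PySem.Str.toList_slice, PySem.Chars.slice_eq_listSlice,
    PySem.List.slice_to_natCast, List.length_take] at this
  have hp : p.toList.length = p.length := by simp
  omega

-- c[:L] = p with len(p) < L forces c = p
theorem sliceBig (c p : String) (L : Nat) (h : p.length < L) :
    (PySem.Str.slice c none (some (L : Int)) = p) ↔ c = p := by
  rw [← String.toList_inj, ← String.toList_inj (s₁ := c), PySem.Str.toList_slice,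
    PySem.Chars.slice_eq_listSlice, PySem.List.slice_to_natCast]
  have hp : p.toList.length = p.length := by simp
  constructor
  · intro heq
    have hlen := congrArg List.length heq
    simp only [List.length_take] at hlen
    have : c.toList.length < L := by omega
    rwa [List.take_of_length_le (by omega)] at heq
  · intro heq
    rw [heq, List.take_of_length_le (by omega)]

-- incomparable prefixes cannot both match the same string
theorem sw_excl (c p q : String) (hpq : ¬ p.toList <+: q.toList) (hqp : ¬ q.toList <+: p.toList)
    (h : PySem.Str.startswith c p = true) : PySem.Str.startswith c q = false := by
  by_contra hq
  rw [Bool.not_eq_false] at hq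
  rw [PySem.Str.startswith_eq, PySem.Chars.startswith_iff] at h hq
  rcases List.prefix_or_prefix_of_prefix h hq with h' | h'
  · exact hpq h'
  · exact hqp h'

-- one step of B's loop, on a dict with exactly the six label keys
theorem bStep (c0 : String) (v1 v2 v3 v4 v5 v6 : Int) :
    pvStep (PySem.Dict.mk [("1dAVb", v1), ("RBBB", v2), ("LBBB", v3), ("SB", v4), ("ST", v5), ("AF", v6)]) c0
    = PySem.Dict.mk
      [("1dAVb", if PySem.Str.startswith (pvNorm c0) "I440" then 1 else v1),
       ("RBBB", if PySem.Str.startswith (pvNorm c0) "I451" then 1 else v2),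
       ("LBBB", if PySem.Str.startswith (pvNorm c0) "I447" then 1 else v3),
       ("SB", if PySem.Str.startswith (pvNorm c0) "R001" then 1 else v4),
       ("ST", if PySem.Str.startswith (pvNorm c0) "R000" then 1 else v5),
       ("AF", if PySem.Str.startswith (pvNorm c0) "I48" then 1 else v6)] := by
  have hL : pvLengths = [3, 4] := by decide
  have hD : pvPrefixToLabel = PySem.Dict.mk
      [("I440", "1dAVb"), ("I451", "RBBB"), ("I447", "LBBB"),
       ("R001", "SB"), ("R000", "ST"), ("I48", "AF")] := by decide
  unfold pvStep
  rw [hL, hD]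
  set c := pvNorm c0 with hc
  have n440 : (("I440" : String) == PySem.Str.slice c none (some 3)) = false := by
    rw [beq_eq_false_iff_ne]; intro h; exact sliceNe c "I440" 3 (by decide) h.symm
  have n451 : (("I451" : String) == PySem.Str.slice c none (some 3)) = false := by
    rw [beq_eq_false_iff_ne]; intro h; exact sliceNe c "I451" 3 (by decide) h.symm
  have n447 : (("I447" : String) == PySem.Str.slice c none (some 3)) = false := by
    rw [beq_eq_false_iff_ne]; intro h; exact sliceNe c "I447" 3 (by decide) h.symm
  have n001 : (("R001" : String) == PySem.Str.slice c none (some 3)) = false := by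
    rw [beq_eq_false_iff_ne]; intro h; exact sliceNe c "R001" 3 (by decide) h.symm
  have n000 : (("R000" : String) == PySem.Str.slice c none (some 3)) = false := by
    rw [beq_eq_false_iff_ne]; intro h; exact sliceNe c "R000" 3 (by decide) h.symm
  have e48 : (("I48" : String) == PySem.Str.slice c none (some 3)) = PySem.Str.startswith c "I48" := by
    rw [Bool.eq_iff_iff, beq_iff_eq, eq_comm, show ((3 : Int)) = (("I48".length : Nat) : Int) by decide]
    exact sliceEq c "I48"
  have e440 : (("I440" : String) == PySem.Str.slice c none (some 4)) = PySem.Str.startswith c "I440" := by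
    rw [Bool.eq_iff_iff, beq_iff_eq, eq_comm, show ((4 : Int)) = (("I440".length : Nat) : Int) by decide]
    exact sliceEq c "I440"
  have e451 : (("I451" : String) == PySem.Str.slice c none (some 4)) = PySem.Str.startswith c "I451" := by
    rw [Bool.eq_iff_iff, beq_iff_eq, eq_comm, show ((4 : Int)) = (("I451".length : Nat) : Int) by decide]
    exact sliceEq c "I451"
  have e447 : (("I447" : String) == PySem.Str.slice c none (some 4)) = PySem.Str.startswith c "I447" := by
    rw [Bool.eq_iff_iff, beq_iff_eq, eq_comm, show ((4 : Int)) = (("I447".length : Nat) : Int) by decide]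
    exact sliceEq c "I447"
  have e001 : (("R001" : String) == PySem.Str.slice c none (some 4)) = PySem.Str.startswith c "R001" := by
    rw [Bool.eq_iff_iff, beq_iff_eq, eq_comm, show ((4 : Int)) = (("R001".length : Nat) : Int) by decide]
    exact sliceEq c "R001"
  have e000 : (("R000" : String) == PySem.Str.slice c none (some 4)) = PySem.Str.startswith c "R000" := by
    rw [Bool.eq_iff_iff, beq_iff_eq, eq_comm, show ((4 : Int)) = (("R000".length : Nat) : Int) by decide]
    exact sliceEq c "R000"
  have e48b : (("I48" : String) == PySem.Str.slice c none (some 4)) = (c == "I48") := by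
    rw [Bool.eq_iff_iff, beq_iff_eq, beq_iff_eq, eq_comm]
    exact sliceBig c "I48" 4 (by decide)
  simp only [List.foldl, PySem.Dict.get?_mk_cons, n440, n451, n447, n001, n000,
    e48, e440, e451, e447, e001, e000, e48b]
  cases h48 : PySem.Str.startswith c "I48" with
  | true =>
    have f1 : PySem.Str.startswith c "I440" = false := sw_excl c "I48" "I440" (by decide) (by decide) h48
    have f2 : PySem.Str.startswith c "I451" = false := sw_excl c "I48" "I451" (by decide) (by decide) h48
    have f3 : PySem.Str.startswith c "I447" = false := sw_excl c "I48" "I447" (by decide) (by decide) h48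
    have f4 : PySem.Str.startswith c "R001" = false := sw_excl c "I48" "R001" (by decide) (by decide) h48
    have f5 : PySem.Str.startswith c "R000" = false := sw_excl c "I48" "R000" (by decide) (by decide) h48
    cases hq : (c == "I48") <;> (simp only [f1, f2, f3, f4, f5]; simp [PySem.Dict.insert, PySem.Dict.get?])
  | false =>
    have hq : (c == "I48") = false := by
      rw [beq_eq_false_iff_ne]; intro h; rw [h] at h48; exact absurd h48 (by decide)
    cases h1 : PySem.Str.startswith c "I440" with
    | true =>
      have f2 : PySem.Str.startswith c "I451" = false := sw_excl c "I440" "I451" (by decide) (by decide) h1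
      have f3 : PySem.Str.startswith c "I447" = false := sw_excl c "I440" "I447" (by decide) (by decide) h1
      have f4 : PySem.Str.startswith c "R001" = false := sw_excl c "I440" "R001" (by decide) (by decide) h1
      have f5 : PySem.Str.startswith c "R000" = false := sw_excl c "I440" "R000" (by decide) (by decide) h1
      simp only [f2, f3, f4, f5, hq]; simp [PySem.Dict.insert, PySem.Dict.get?]
    | false =>
      cases h2 : PySem.Str.startswith c "I451" with
      | true =>
        have f3 : PySem.Str.startswith c "I447" = false := sw_excl c "I451" "I447" (by decide) (by decide) h2
        have f4 : PySem.Str.startswith c "R001" = false := sw_excl c "I451" "R001" (by decide) (by decide) h2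
        have f5 : PySem.Str.startswith c "R000" = false := sw_excl c "I451" "R000" (by decide) (by decide) h2
        simp only [f3, f4, f5, hq]; simp [PySem.Dict.insert, PySem.Dict.get?]
      | false =>
        cases h3 : PySem.Str.startswith c "I447" with
        | true =>
          have f4 : PySem.Str.startswith c "R001" = false := sw_excl c "I447" "R001" (by decide) (by decide) h3
          have f5 : PySem.Str.startswith c "R000" = false := sw_excl c "I447" "R000" (by decide) (by decide) h3
          simp only [f4, f5, hq]; simp [PySem.Dict.insert, PySem.Dict.get?]
        | false =>
          cases h4 : PySem.Str.startswith c "R001" with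
          | true =>
            have f5 : PySem.Str.startswith c "R000" = false := sw_excl c "R001" "R000" (by decide) (by decide) h4
            simp only [f5, hq]; simp [PySem.Dict.insert, PySem.Dict.get?]
          | false =>
            cases h5 : PySem.Str.startswith c "R000" <;> (simp only [hq]; simp [PySem.Dict.insert, PySem.Dict.get?])

theorem bLoop (cs : List String) (v1 v2 v3 v4 v5 v6 : Int) :
    (cs.foldl pvStep
      (PySem.Dict.mk [("1dAVb", v1), ("RBBB", v2), ("LBBB", v3), ("SB", v4), ("ST", v5), ("AF", v6)])).items
    = [("1dAVb", if pvHit "I440" cs then 1 else v1), ("RBBB", if pvHit "I451" cs then 1 else v2),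
       ("LBBB", if pvHit "I447" cs then 1 else v3), ("SB", if pvHit "R001" cs then 1 else v4),
       ("ST", if pvHit "R000" cs then 1 else v5), ("AF", if pvHit "I48" cs then 1 else v6)] := by
  induction cs generalizing v1 v2 v3 v4 v5 v6 with
  | nil => simp [pvHit]
  | cons c cs ih =>
    rw [List.foldl_cons, bStep, ih]
    simp only [pvHit_cons]
    rw [ifOr, ifOr, ifOr, ifOr, ifOr, ifOr]

-- ===== VERDICT (by name: the statement is the Claim_ definition above) =====
theorem codes_to_labels_spec : Claim_equal_codes_to_labels := by
  intro codes _
  unfold Spec_codes_to_labels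
  match codes with
  | none => rfl
  | some cs => rw [aChar, altChar, bLoop]
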